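-- pv_equiv track=rewrite | github.com/MarkStroykow/VKR | pcreate.py | fsimp
-- ===== SOURCE A (Python) =====
-- def fsimp(individ):
--     sumsim=0
--     for i in individ:
--         if i >= 0:
--             sumsim += i
--         else:
--             return 9999
--     return sumsim
-- ===== SOURCE B (Python) =====
-- def fsimp(individ):
--     ordered = sorted(individ)
--     if ordered and ordered[0] < 0:
--         return 9999
--     return sum(ordered)
-- ===== Notes on version B (the rewrite author's own statement) =====
-- stated objective: alternative
-- what changed: Instead of one accumulating scan with an early return, B sorts the list and inspects only the smallest element (the head of the sorted list) to decide between 9999 and the sum of the sorted copy.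
import Mathlib
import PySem

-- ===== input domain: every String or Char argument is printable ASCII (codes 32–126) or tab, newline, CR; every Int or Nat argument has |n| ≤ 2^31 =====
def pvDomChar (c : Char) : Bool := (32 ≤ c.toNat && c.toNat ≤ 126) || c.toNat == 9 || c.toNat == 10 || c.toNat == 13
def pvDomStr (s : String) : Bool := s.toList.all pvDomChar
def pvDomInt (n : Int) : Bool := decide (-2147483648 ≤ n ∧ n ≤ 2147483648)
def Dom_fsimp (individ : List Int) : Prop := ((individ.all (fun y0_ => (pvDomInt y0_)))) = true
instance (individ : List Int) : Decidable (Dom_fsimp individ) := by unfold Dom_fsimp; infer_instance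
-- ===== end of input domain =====

-- B replaces A's accumulating scan with early return by a sort-based minimum check: sort, and if the smallest element is negative return 9999, else sum.

-- ===== PORT A =====
-- A's loop with accumulator sumsim and early return, as structural recursion over the list.
def fsimpLoop (sumsim : Int) : List Int → Int
  | [] => sumsim
  | i :: rest => if i ≥ 0 then fsimpLoop (sumsim + i) rest else 9999

def fsimp (individ : List Int) : Int := fsimpLoop 0 individ

-- ===== PORT B =====
-- ordered = sorted(individ); if ordered and ordered[0] < 0: return 9999; return sum(ordered)
def fsimp_alt (individ : List Int) : Int :=
  let ordered := PySem.List.sorted individ (fun x => x) false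
  match ordered with
  | [] => ordered.sum
  | m :: _ => if m < 0 then 9999 else ordered.sum

-- ===== PRECONDITION & SPEC =====
def Spec_fsimp (individ : List Int) (out : Int) : Prop := out = fsimp_alt individ
instance (individ : List Int) (out : Int) : Decidable (Spec_fsimp individ out) := by unfold Spec_fsimp; infer_instance

-- ===== CLAIM (what is proved, stated in full; the proofs are below) =====
def Claim_equal_fsimp : Prop := ∀ (individ : List Int), Dom_fsimp individ → Spec_fsimp individ (fsimp individ)

-- ===== LEMMAS AND PROOFS =====
lemma fsimpLoop_eq (l : List Int) : ∀ (acc : Int),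
    fsimpLoop acc l = if l.any (fun i => i < 0) then 9999 else acc + l.sum := by
  induction l with
  | nil => intro acc; simp [fsimpLoop]
  | cons i rest ih =>
    intro acc
    simp only [fsimpLoop, List.any_cons, List.sum_cons]
    by_cases hi : i ≥ 0
    · have : ¬ (i < 0) := not_lt.mpr hi
      simp [hi, this, ih, add_assoc]
    · have : i < 0 := lt_of_not_ge hi
      simp [hi, this]

-- ===== VERDICT (by name: the statement is the Claim_ definition above) =====
theorem fsimp_spec : Claim_equal_fsimp := by
  intro individ _
  unfold Spec_fsimp fsimp fsimp_alt
  rw [fsimpLoop_eq]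
  have hperm : (PySem.List.sorted individ (fun x => x) false).Perm individ :=
    PySem.List.sorted_perm ..
  have hsum : (PySem.List.sorted individ (fun x => x) false).sum = individ.sum :=
    hperm.sum_eq
  cases hs : PySem.List.sorted individ (fun x => x) false with
  | nil =>
    have : individ = [] := (PySem.List.sorted_eq_nil_iff ..).mp hs
    subst this
    simp
  | cons m t =>
    have hmin : ∀ y ∈ individ, m ≤ y := by
      intro y hy
      exact PySem.List.key_head_sorted_le individ (fun x => x) hs y hy
    have hmmem : m ∈ individ := hperm.mem_iff.mp (hs ▸ List.mem_cons_self ..)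
    by_cases hm : m < 0
    · have : individ.any (fun i => i < 0) = true := by
        simp only [List.any_eq_true, decide_eq_true_eq]
        exact ⟨m, hmmem, hm⟩
      simp [this, hm]
    · have : individ.any (fun i => i < 0) = false := by
        simp only [List.any_eq_false, decide_eq_true_eq, not_lt]
        intro y hy
        exact le_trans (not_lt.mp hm) (hmin y hy)
      rw [hs] at hsum
      simp [this, hm, ← hsum]
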